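-- pv_equiv track=rewrite | github.com/starlight-traveler/franc-master-control | src/aprs/python/ax25.py | nrzi
-- ===== SOURCE A (Python) =====
-- def nrzi(data: list):
--     """
--     NRZI encoding:
--         0 -> change in tone
--         1 -> no change in tone
--     data is a list of booleans.
--     """
--     result = []
--     current = True
--     for bit in data:
--         if not bit:
--             current = not current
--         result.append(current)
--     return result
-- ===== SOURCE B (Python) =====
-- def nrzi(data: list):
--     # Two passes: prefix-count the zeros, then map each count to its parity.
--     counts = []
--     c = 0
--     for bit in data:
--         c += 0 if bit else 1
--         counts.append(c)
--     return [k % 2 == 0 for k in counts]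
-- ===== Notes on version B (the rewrite author's own statement) =====
-- stated objective: alternative
-- what changed: Replaces the single state-toggling scan with a prefix zero-count pass followed by a parity map (count % 2 == 0).
import Mathlib
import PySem

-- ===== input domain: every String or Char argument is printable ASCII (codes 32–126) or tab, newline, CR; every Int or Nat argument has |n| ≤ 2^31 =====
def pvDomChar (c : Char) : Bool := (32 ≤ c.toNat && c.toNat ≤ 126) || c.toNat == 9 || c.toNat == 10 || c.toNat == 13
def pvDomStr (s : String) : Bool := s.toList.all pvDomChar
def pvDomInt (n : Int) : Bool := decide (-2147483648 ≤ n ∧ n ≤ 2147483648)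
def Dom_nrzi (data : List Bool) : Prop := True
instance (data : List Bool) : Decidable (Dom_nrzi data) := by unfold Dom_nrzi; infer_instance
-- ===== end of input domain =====

-- ===== PORT A =====
-- B replaces A's state-toggling scan with a prefix zero-count pass plus a parity map (alternative decomposition).
def nrziLoop (data : List Bool) (current : Bool) (result : List Bool) : List Bool :=
  match data with
  | [] => result
  | bit :: rest =>
    let current' := if !bit then !current else current
    nrziLoop rest current' (result ++ [current'])

def nrzi (data : List Bool) : List Bool := nrziLoop data true []

-- ===== PORT B =====
def countsLoop (data : List Bool) (c : Int) (counts : List Int) : List Int :=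
  match data with
  | [] => counts
  | bit :: rest =>
    let c' := c + (if bit then 0 else 1)
    countsLoop rest c' (counts ++ [c'])

def nrzi_alt (data : List Bool) : List Bool :=
  (countsLoop data 0 []).map (fun k => decide (PySem.Int.mod k 2 = 0))

-- ===== PRECONDITION & SPEC =====
def Spec_nrzi (data : List Bool) (out : List Bool) : Prop := out = nrzi_alt data
instance (data : List Bool) (out : List Bool) : Decidable (Spec_nrzi data out) := by unfold Spec_nrzi; infer_instance

-- ===== CLAIM (what is proved, stated in full; the proofs are below) =====
def Claim_equal_nrzi : Prop := ∀ (data : List Bool), Dom_nrzi data → Spec_nrzi data (nrzi data)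

-- ===== LEMMAS AND PROOFS =====

theorem countsLoop_acc (data : List Bool) (c : Int) (acc : List Int) :
    countsLoop data c acc = acc ++ countsLoop data c [] := by
  induction data generalizing c acc with
  | nil => simp [countsLoop]
  | cons bit rest ih =>
    simp only [countsLoop]
    rw [ih]
    conv_rhs => rw [ih]
    simp

theorem parity_succ_dvd (c : Int) :
    decide ((2:Int) ∣ (c + 1)) = !decide ((2:Int) ∣ c) := by
  rcases Int.emod_two_eq_zero_or_one c with h | h <;>
    simp [Int.dvd_iff_emod_eq_zero, Int.add_emod, h]

theorem parity_succ (c : Int) :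
    decide (PySem.Int.mod (c + 1) 2 = 0) = !decide (PySem.Int.mod c 2 = 0) := by
  rw [PySem.Int.mod_eq_emod_of_pos (by omega : (0:Int) < 2), PySem.Int.mod_eq_emod_of_pos (by omega : (0:Int) < 2)]
  rcases Int.emod_two_eq_zero_or_one c with h | h <;> simp [Int.add_emod, h]

theorem loops_agree (data : List Bool) (c : Int) (res : List Bool) :
    nrziLoop data (decide (PySem.Int.mod c 2 = 0)) res
      = res ++ (countsLoop data c []).map (fun k => decide (PySem.Int.mod k 2 = 0)) := by
  induction data generalizing c res with
  | nil => simp [nrziLoop, countsLoop]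
  | cons bit rest ih =>
    simp only [nrziLoop, countsLoop]
    rw [countsLoop_acc]
    cases bit with
    | true =>
      simpa using ih c (res ++ [decide (PySem.Int.mod c 2 = 0)])
    | false =>
      have h := ih (c + 1) (res ++ [decide (PySem.Int.mod (c + 1) 2 = 0)])
      rw [parity_succ] at h
      rw [countsLoop_acc]
      simp only [List.map_cons, List.append_assoc, List.singleton_append,
        List.nil_append] at h ⊢
      simpa [parity_succ_dvd] using h

-- ===== VERDICT (by name: the statement is the Claim_ definition above) =====
theorem nrzi_spec : Claim_equal_nrzi := by
  intro data _
  unfold Spec_nrzi nrzi nrzi_alt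
  have h := loops_agree data 0 []
  rw [show (decide (PySem.Int.mod 0 2 = 0)) = true from by decide] at h
  simpa using h
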